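-- pv_equiv track=rewrite | github.com/taurinrobinson-wq/saoriverse-console | scripts/convert_chord_pivot.py | normalize_triads
-- ===== SOURCE A (Python) =====
-- def normalize_triads(val):
--     if val is None:
--         return []
--     s = str(val).strip()
--     if not s:
--         return []
--     # split on commas or slashes
--     parts = [p.strip() for p in s.split(",") if p.strip()]
--     # further split parts that contain spaces
--     out = []
--     for p in parts:
--         for tok in p.split():
--             t = tok.strip().lower()
--             if t:
--                 out.append(t)
--     return out
-- ===== SOURCE B (Python) =====
-- def normalize_triads(val):
--     # single-pass character scanner: accumulate the current token explicitly,
--     # flush on comma/whitespace; no intermediate substring lists are built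
--     if val is None:
--         return []
--     out = []
--     cur = []
--     for ch in str(val):
--         if ch == ',' or ch.isspace():
--             if cur:
--                 out.append(''.join(cur))
--                 cur = []
--         else:
--             cur.append(ch.lower())
--     if cur:
--         out.append(''.join(cur))
--     return out
-- ===== Notes on version B (the rewrite author's own statement) =====
-- stated objective: alternative
-- what changed: Replaces the staged strip / comma-split / per-part whitespace-split / strip / lower pipeline by a one-pass character scanner with an explicit current-token accumulator that lowercases characters as they are read and flushes the token on a comma or whitespace.
import Mathlib
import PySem

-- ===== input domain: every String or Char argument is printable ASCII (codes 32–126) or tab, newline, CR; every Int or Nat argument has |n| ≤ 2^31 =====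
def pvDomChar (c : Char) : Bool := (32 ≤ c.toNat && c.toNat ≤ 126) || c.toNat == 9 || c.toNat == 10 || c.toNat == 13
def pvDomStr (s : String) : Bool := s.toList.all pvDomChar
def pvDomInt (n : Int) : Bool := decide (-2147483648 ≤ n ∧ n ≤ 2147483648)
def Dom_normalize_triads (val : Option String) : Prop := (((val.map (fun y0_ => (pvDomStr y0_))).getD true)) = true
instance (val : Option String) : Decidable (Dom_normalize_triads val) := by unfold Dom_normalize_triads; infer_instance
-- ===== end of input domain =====

-- B replaces A's staged strip/comma-split/whitespace-split/lower pipeline by a one-pass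
-- character scanner with an explicit token accumulator; alternative structure, not claimed faster.

-- ===== PORT A =====
def normalize_triads (val : Option String) : List String :=
  match val with
  | none => []
  | some v =>
    let s := PySem.Str.strip v
    if s = "" then []
    else
      -- s.split(","): sep "," ≠ "", so split? is some and never raises
      let parts : List String := ((PySem.Str.split? s ",").getD []).filterMap
        (fun p => let q := PySem.Str.strip p; if q = "" then none else some q)
      parts.foldl (fun out p =>
        (PySem.Str.split₀ p).foldl (fun out tok =>
          let t := PySem.Str.lower (PySem.Str.strip tok)
          if t = "" then out else out ++ [t]) out) []

-- ===== PORT B =====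
-- one step of B's scanner: flush the current token on ',' or whitespace, else push the lowered char
def pvStepB (st : List String × List Char) (ch : Char) : List String × List Char :=
  if ch = ',' || PySem.Chars.isspace ch then
    if st.2.isEmpty then st else (st.1 ++ [String.ofList st.2.reverse], [])
  else (st.1, PySem.Chars.lowerChar ch :: st.2)

def normalize_triads_alt (val : Option String) : List String :=
  match val with
  | none => []
  | some v =>
    let st := v.toList.foldl pvStepB ([], [])
    if st.2.isEmpty then st.1 else st.1 ++ [String.ofList st.2.reverse]

-- ===== PRECONDITION & SPEC =====
def Spec_normalize_triads (val : Option String) (out : List String) : Prop := out = normalize_triads_alt val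
instance (val : Option String) (out : List String) : Decidable (Spec_normalize_triads val out) := by unfold Spec_normalize_triads; infer_instance

-- ===== CLAIM (what is proved, stated in full; the proofs are below) =====
def Claim_equal_normalize_triads : Prop := ∀ (val : Option String), Dom_normalize_triads val → Spec_normalize_triads val (normalize_triads val)

-- ===== LEMMAS AND PROOFS =====

-- `pvRep` is what the single-character replace "," → " " does to each character
def pvRep (c : Char) : Char := if c = ',' then ' ' else c

-- spec of Chars.split₀.go with an explicit current-token accumulator
def pvTks : List Char → List Char → List (List Char)
  | [], cur => if cur.isEmpty then [] else [cur.reverse]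
  | c :: rest, cur =>
      if PySem.Chars.isspace c then
        (if cur.isEmpty then pvTks rest [] else cur.reverse :: pvTks rest [])
      else pvTks rest (c :: cur)

-- spec of s.split(",") (single-character separator)
def pvSplitComma : List Char → List (List Char)
  | [] => [[]]
  | c :: rest =>
      if c = ',' then [] :: pvSplitComma rest
      else
        match pvSplitComma rest with
        | [] => [[c]]
        | p :: ps => (c :: p) :: ps

lemma pvTks_nil (cur : List Char) :
    pvTks [] cur = if cur.isEmpty then [] else [cur.reverse] := rfl

lemma pvTks_cons (c : Char) (rest cur : List Char) :
    pvTks (c :: rest) cur =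
      if PySem.Chars.isspace c then
        (if cur.isEmpty then pvTks rest [] else cur.reverse :: pvTks rest [])
      else pvTks rest (c :: cur) := rfl

lemma pvTks_go (l : List Char) : ∀ (cur : List Char) (acc : List (List Char)),
    PySem.Chars.split₀.go l cur acc = acc.reverse ++ pvTks l cur := by
  induction l with
  | nil =>
    intro cur acc
    rw [PySem.Chars.split₀.go]
    unfold pvTks
    split_ifs <;> simp
  | cons c rest ih =>
    intro cur acc
    rw [PySem.Chars.split₀.go]
    unfold pvTks
    split_ifs <;> simp [ih]

lemma pvSplit₀_eq_tks (l : List Char) : PySem.Chars.split₀ l = pvTks l [] := by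
  simpa using pvTks_go l [] []

lemma pvSplitComma_ne_nil (l : List Char) : pvSplitComma l ≠ [] := by
  cases l with
  | nil => simp [pvSplitComma]
  | cons c rest =>
    unfold pvSplitComma
    split_ifs <;> simp
    cases pvSplitComma rest <;> simp

lemma pvSplitOn_go_comma (fuel : Nat) : ∀ (l cur : List Char) (acc : List (List Char)),
    l.length < fuel →
    PySem.Chars.splitOn.go [','] fuel l cur acc =
      acc.reverse ++ (match pvSplitComma l with
        | [] => []
        | p :: ps => (cur.reverse ++ p) :: ps) := by
  induction fuel with
  | zero => intro l cur acc h; omega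
  | succ fuel ih =>
    intro l cur acc h
    cases l with
    | nil =>
      rw [PySem.Chars.splitOn.go]
      · simp [pvSplitComma]
      · omega
    | cons c rest =>
      rw [PySem.Chars.splitOn.go]
      have hpre : [','].isPrefixOf (c :: rest) = (c == ',') := by
        simp [List.isPrefixOf, eq_comm]
      by_cases hc : c = ','
      · subst hc
        simp only [hpre, BEq.rfl, if_true, List.length_cons, List.length_nil, List.drop_succ_cons,
          List.drop_zero, Nat.zero_add] at *
        rw [ih rest [] (cur.reverse :: acc) (by omega)]
        have hne := pvSplitComma_ne_nil rest
        cases hps : pvSplitComma rest with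
        | nil => exact absurd hps hne
        | cons p ps => simp [pvSplitComma, hps]
      · have : (c == ',') = false := by simp [hc]
        simp only [hpre, this, Bool.false_eq_true, if_false] at *
        rw [ih rest (c :: cur) acc (by simp at h ⊢; omega)]
        have hne := pvSplitComma_ne_nil rest
        cases hps : pvSplitComma rest with
        | nil => exact absurd hps hne
        | cons p ps => simp [pvSplitComma, hc, hps]

lemma pvSplitOn_comma (l : List Char) :
    PySem.Chars.splitOn l [','] = pvSplitComma l := by
  unfold PySem.Chars.splitOn
  rw [pvSplitOn_go_comma (l.length + 1) l [] [] (by omega)]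
  have hne := pvSplitComma_ne_nil l
  cases hps : pvSplitComma l with
  | nil => exact absurd hps hne
  | cons p ps => simp

lemma pvTks_mem (l : List Char) : ∀ (cur t : List Char),
    t ∈ pvTks l cur → (∀ c ∈ cur, PySem.Chars.isspace c = false) →
    t ≠ [] ∧ ∀ c ∈ t, PySem.Chars.isspace c = false := by
  induction l with
  | nil =>
    intro cur t ht hcur
    unfold pvTks at ht
    split_ifs at ht with hc
    · simp at ht
    · simp at ht
      subst ht
      constructor
      · simp [List.isEmpty_iff] at hc ⊢; exact hc
      · intro c hc'; exact hcur c (by simpa using hc')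
  | cons c rest ih =>
    intro cur t ht hcur
    unfold pvTks at ht
    split_ifs at ht with hsp hc
    · exact ih [] t ht (by simp)
    · simp only [List.mem_cons] at ht
      rcases ht with ht | ht
      · subst ht
        constructor
        · simp [List.isEmpty_iff] at hc ⊢; exact hc
        · intro c' hc'; exact hcur c' (by simpa using hc')
      · exact ih [] t ht (by simp)
    · refine ih (c :: cur) t ht ?_
      intro c' hc'
      rcases List.mem_cons.mp hc' with h | h
      · subst h; simpa using hsp
      · exact hcur c' h

lemma pvTks_spaces_nil (ss : List Char) (h : ∀ c ∈ ss, PySem.Chars.isspace c = true) :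
    pvTks ss [] = [] := by
  induction ss with
  | nil => rfl
  | cons c rest ih =>
    unfold pvTks
    simp [h c (by simp), ih (fun c' hc' => h c' (by simp [hc']))]

lemma pvTks_spaces (ss : List Char) (h : ∀ c ∈ ss, PySem.Chars.isspace c = true) (cur : List Char) :
    pvTks ss cur = if cur.isEmpty then [] else [cur.reverse] := by
  cases ss with
  | nil => rfl
  | cons c rest =>
    have hrest : pvTks rest [] = [] := pvTks_spaces_nil rest (fun c' hc' => h c' (by simp [hc']))
    unfold pvTks
    simp [h c (by simp), hrest]

lemma pvTks_append_spaces (ss : List Char) (hss : ∀ c ∈ ss, PySem.Chars.isspace c = true)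
    (l : List Char) : ∀ (cur : List Char), pvTks (l ++ ss) cur = pvTks l cur := by
  induction l with
  | nil =>
    intro cur
    simpa [pvTks] using pvTks_spaces ss hss cur
  | cons c rest ih =>
    intro cur
    show pvTks (c :: (rest ++ ss)) cur = pvTks (c :: rest) cur
    unfold pvTks
    by_cases hsp : PySem.Chars.isspace c <;> by_cases hcur : cur.isEmpty <;>
      simp [hsp, hcur, ih]

lemma pvTks_prefix_spaces (ss : List Char) (hss : ∀ c ∈ ss, PySem.Chars.isspace c = true) :
    ∀ (l : List Char), pvTks (ss ++ l) [] = pvTks l [] := by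
  induction ss with
  | nil => intro l; rfl
  | cons c rest ih =>
    intro l
    have h1 := ih (fun c' hc' => hss c' (by simp [hc'])) l
    show pvTks (c :: (rest ++ l)) [] = pvTks l []
    rw [pvTks_cons]
    simp [hss c (by simp), h1]

lemma pvStrip_of_nonspace (t : List Char) (h : ∀ c ∈ t, PySem.Chars.isspace c = false) :
    PySem.Chars.strip t = t := by
  unfold PySem.Chars.strip PySem.Chars.rstrip PySem.Chars.lstrip
  have hl : List.dropWhile PySem.Chars.isspace t = t :=
    List.dropWhile_eq_self_iff.mpr (fun hl => by
      simpa using h _ (List.getElem_mem hl))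
  rw [hl]
  have hr : List.dropWhile PySem.Chars.isspace t.reverse = t.reverse :=
    List.dropWhile_eq_self_iff.mpr (fun hl => by
      have := List.getElem_mem hl
      simp only [List.mem_reverse] at this
      simpa using h _ this)
  rw [hr, List.reverse_reverse]

-- pvRep fixes whitespace characters (',' is not whitespace)
lemma pvRep_ws (c : Char) (h : PySem.Chars.isspace c = true) : pvRep c = c := by
  unfold pvRep
  split_ifs with hc
  · subst hc; exact absurd h (by decide)
  · rfl

lemma pvMap_rep_ws (ss : List Char) (h : ∀ c ∈ ss, PySem.Chars.isspace c = true) :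
    ss.map pvRep = ss := by
  apply (List.map_congr_left ?_).trans (List.map_id ss)
  intro c hc
  exact pvRep_ws c (h c hc)

-- every character of a list whose strip is empty is whitespace
lemma pvAllWs_of_strip_nil (L : List Char) (h : PySem.Chars.strip L = []) :
    ∀ c ∈ L, PySem.Chars.isspace c = true := by
  unfold PySem.Chars.strip PySem.Chars.rstrip PySem.Chars.lstrip at h
  set u := List.dropWhile PySem.Chars.isspace L with hu
  have h2 : List.dropWhile PySem.Chars.isspace u.reverse = [] := by
    have := congrArg List.reverse h
    simpa using this
  have hall_u : ∀ c ∈ u, PySem.Chars.isspace c = true := by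
    intro c hc
    have : c ∈ u.reverse := by simpa using hc
    have := List.dropWhile_eq_nil_iff.mp h2
    simpa using this c (by simpa using hc)
  intro c hc
  have : c ∈ List.takeWhile PySem.Chars.isspace L ++ u := by
    rw [hu, List.takeWhile_append_dropWhile]; exact hc
  rcases List.mem_append.mp this with h' | h'
  · exact List.mem_takeWhile_imp h'
  · exact hall_u c h'

-- stripping before the rep-tokenization changes nothing
lemma pvTksRep_strip (L : List Char) :
    pvTks ((PySem.Chars.strip L).map pvRep) [] = pvTks (L.map pvRep) [] := by
  unfold PySem.Chars.strip PySem.Chars.rstrip PySem.Chars.lstrip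
  set u := List.dropWhile PySem.Chars.isspace L with hu
  have hpre : ∀ c ∈ List.takeWhile PySem.Chars.isspace L, PySem.Chars.isspace c = true :=
    fun c hc => List.mem_takeWhile_imp hc
  have hsuf : ∀ c ∈ (List.takeWhile PySem.Chars.isspace u.reverse).reverse,
      PySem.Chars.isspace c = true := by
    intro c hc
    exact List.mem_takeWhile_imp (by simpa using hc)
  have hdecomp : u = (List.dropWhile PySem.Chars.isspace u.reverse).reverse
      ++ (List.takeWhile PySem.Chars.isspace u.reverse).reverse := by
    have h1 : List.takeWhile PySem.Chars.isspace u.reverse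
        ++ List.dropWhile PySem.Chars.isspace u.reverse = u.reverse :=
      List.takeWhile_append_dropWhile
    calc u = u.reverse.reverse := by simp
      _ = (List.takeWhile PySem.Chars.isspace u.reverse
            ++ List.dropWhile PySem.Chars.isspace u.reverse).reverse := by rw [h1]
      _ = _ := by rw [List.reverse_append]
  have hL : L = List.takeWhile PySem.Chars.isspace L ++ u := by
    rw [hu, List.takeWhile_append_dropWhile]
  calc pvTks (((List.dropWhile PySem.Chars.isspace u.reverse).reverse).map pvRep) []
      = pvTks (((List.dropWhile PySem.Chars.isspace u.reverse).reverse).map pvRep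
          ++ (List.takeWhile PySem.Chars.isspace u.reverse).reverse) [] := by
        rw [pvTks_append_spaces _ hsuf]
    _ = pvTks (((List.dropWhile PySem.Chars.isspace u.reverse).reverse).map pvRep
          ++ ((List.takeWhile PySem.Chars.isspace u.reverse).reverse).map pvRep) [] := by
        rw [pvMap_rep_ws _ hsuf]
    _ = pvTks (u.map pvRep) [] := by rw [← List.map_append, ← hdecomp]
    _ = pvTks (List.takeWhile PySem.Chars.isspace L ++ u.map pvRep) [] := by
        rw [pvTks_prefix_spaces _ hpre]
    _ = pvTks ((List.takeWhile PySem.Chars.isspace L).map pvRep ++ u.map pvRep) [] := by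
        rw [pvMap_rep_ws _ hpre]
    _ = pvTks (L.map pvRep) [] := by rw [← List.map_append, ← hL]

lemma pvTks_lstrip (l : List Char) :
    pvTks (List.dropWhile PySem.Chars.isspace l) [] = pvTks l [] := by
  induction l with
  | nil => rfl
  | cons c rest ih =>
    by_cases hsp : PySem.Chars.isspace c
    · rw [List.dropWhile_cons_of_pos (by simpa using hsp)]
      rw [ih]
      conv_rhs => unfold pvTks
      simp [hsp]
    · rw [List.dropWhile_cons_of_neg (by simpa using hsp)]

lemma pvSplit₀_strip (p : List Char) :
    PySem.Chars.split₀ (PySem.Chars.strip p) = PySem.Chars.split₀ p := by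
  rw [pvSplit₀_eq_tks, pvSplit₀_eq_tks]
  unfold PySem.Chars.strip PySem.Chars.rstrip PySem.Chars.lstrip
  set q := List.dropWhile PySem.Chars.isspace p with hq
  have hdecomp : q = (List.dropWhile PySem.Chars.isspace q.reverse).reverse
      ++ (List.takeWhile PySem.Chars.isspace q.reverse).reverse := by
    have h1 : List.takeWhile PySem.Chars.isspace q.reverse
        ++ List.dropWhile PySem.Chars.isspace q.reverse = q.reverse :=
      List.takeWhile_append_dropWhile
    calc q = q.reverse.reverse := by simp
      _ = (List.takeWhile PySem.Chars.isspace q.reverse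
            ++ List.dropWhile PySem.Chars.isspace q.reverse).reverse := by rw [h1]
      _ = _ := by rw [List.reverse_append]
  have hsp : ∀ c ∈ (List.takeWhile PySem.Chars.isspace q.reverse).reverse,
      PySem.Chars.isspace c = true := by
    intro c hc
    exact List.mem_takeWhile_imp (by simpa using hc)
  calc pvTks (List.dropWhile PySem.Chars.isspace q.reverse).reverse []
      = pvTks ((List.dropWhile PySem.Chars.isspace q.reverse).reverse
          ++ (List.takeWhile PySem.Chars.isspace q.reverse).reverse) [] := by
        rw [pvTks_append_spaces _ hsp]
    _ = pvTks q [] := by rw [← hdecomp]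
    _ = pvTks p [] := by rw [hq, pvTks_lstrip]

lemma pvSplit₀_nil_of_strip_nil (p : List Char) (h : PySem.Chars.strip p = []) :
    PySem.Chars.split₀ p = [] := by
  rw [← pvSplit₀_strip, h]; rfl

lemma pvTks_rep (cs : List Char) : ∀ (cur p : List Char) (ps : List (List Char)),
    pvSplitComma cs = p :: ps →
    pvTks (cs.map pvRep) cur
      = pvTks (p.map pvRep) cur ++ ps.flatMap (fun q => pvTks (q.map pvRep) []) := by
  have hsp' : PySem.Chars.isspace ' ' = true := by decide
  induction cs with
  | nil =>
    intro cur p ps h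
    simp only [pvSplitComma] at h
    injection h with h1 h2
    subst h1; subst h2
    simp
  | cons c rest ih =>
    intro cur p ps h
    obtain ⟨p', ps', hps⟩ : ∃ p' ps', pvSplitComma rest = p' :: ps' := by
      cases hx : pvSplitComma rest with
      | nil => exact absurd hx (pvSplitComma_ne_nil rest)
      | cons a b => exact ⟨a, b, rfl⟩
    by_cases hc : c = ','
    · subst hc
      simp only [pvSplitComma, if_true, hps] at h
      injection h with h1 h2
      subst h1; subst h2
      have hrep : pvRep ',' = ' ' := by decide
      show pvTks (pvRep ',' :: rest.map pvRep) cur = _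
      rw [hrep, pvTks_cons, ih [] p' ps' hps]
      by_cases hcur : cur.isEmpty <;> simp [hsp', hcur, pvTks_nil]
    · have hrep : pvRep c = c := by simp [pvRep, hc]
      simp only [pvSplitComma, if_neg hc, hps] at h
      injection h with h1 h2
      subst h1; subst h2
      show pvTks (pvRep c :: rest.map pvRep) cur = pvTks ((c :: p').map pvRep) cur ++ _
      rw [hrep]
      have hmap : (c :: p').map pvRep = c :: p'.map pvRep := by simp [hrep]
      rw [hmap, pvTks_cons, pvTks_cons]
      by_cases hs : PySem.Chars.isspace c <;> by_cases hcur : cur.isEmpty <;>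
        simp [hs, hcur, ih [] p' ps' hps, ih (c :: cur) p' ps' hps]

lemma pvSplitComma_no_comma (cs : List Char) :
    ∀ p ∈ pvSplitComma cs, ∀ c ∈ p, c ≠ ',' := by
  induction cs with
  | nil => intro p hp; simp [pvSplitComma] at hp; simp [hp]
  | cons c rest ih =>
    intro p hp
    by_cases hc : c = ','
    · subst hc
      simp only [pvSplitComma, if_true] at hp
      rcases List.mem_cons.mp hp with h | h
      · simp [h]
      · exact ih p h
    · obtain ⟨p', ps', hps⟩ : ∃ p' ps', pvSplitComma rest = p' :: ps' := by
        cases hx : pvSplitComma rest with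
        | nil => exact absurd hx (pvSplitComma_ne_nil rest)
        | cons a b => exact ⟨a, b, rfl⟩
      simp only [pvSplitComma, if_neg hc, hps] at hp
      rcases List.mem_cons.mp hp with h | h
      · subst h
        intro d hd
        rcases List.mem_cons.mp hd with h' | h'
        · subst h'; exact hc
        · exact ih p' (by simp [hps]) d h'
      · exact ih p (by simp [hps, h])

lemma pvMap_rep_eq (p : List Char) (h : ∀ c ∈ p, c ≠ ',') : p.map pvRep = p := by
  apply List.map_congr_left ?_ |>.trans (List.map_id p)
  intro c hc
  simp [pvRep, h c hc]

lemma pvOfList_eq_empty_iff (x : List Char) : String.ofList x = "" ↔ x = [] := by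
  constructor
  · intro h; have := congrArg String.toList h; simpa using this
  · intro h; simp [h]

lemma pvStrSplit₀_ofList (q : List Char) :
    PySem.Str.split₀ (String.ofList q) = (PySem.Chars.split₀ q).map String.ofList := by
  simp [PySem.Str.split₀]

lemma pvStrStrip_ofList (q : List Char) :
    PySem.Str.strip (String.ofList q) = String.ofList (PySem.Chars.strip q) := by
  simp [PySem.Str.strip]

lemma pvStrLower_ofList (q : List Char) :
    PySem.Str.lower (String.ofList q) = String.ofList (PySem.Chars.lower q) := by
  simp [PySem.Str.lower]

-- the inner token loop of A appends exactly the lowered tokens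
lemma pvInnerAux (L : List (List Char))
    (h : ∀ t ∈ L, t ≠ [] ∧ ∀ c ∈ t, PySem.Chars.isspace c = false) :
    ∀ (out : List String),
    (L.map String.ofList).foldl (fun out tok =>
        if PySem.Str.lower (PySem.Str.strip tok) = "" then out
        else out ++ [PySem.Str.lower (PySem.Str.strip tok)]) out
      = out ++ (L.map String.ofList).map PySem.Str.lower := by
  induction L with
  | nil => intro out; simp
  | cons t L' ih =>
    intro out
    obtain ⟨hne, hns⟩ := h t (by simp)
    have hstrip : PySem.Str.strip (String.ofList t) = String.ofList t := by
      rw [pvStrStrip_ofList, pvStrip_of_nonspace t hns]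
    have hlow : PySem.Str.lower (String.ofList t) = String.ofList (PySem.Chars.lower t) :=
      pvStrLower_ofList t
    have hnemp : ¬ (PySem.Str.lower (PySem.Str.strip (String.ofList t)) = "") := by
      rw [hstrip, hlow, pvOfList_eq_empty_iff]
      simp [PySem.Chars.lower, hne]
    simp only [List.map_cons, List.foldl_cons, if_neg hnemp]
    rw [ih (fun t' ht' => h t' (by simp [ht'])) (out ++ [PySem.Str.lower (PySem.Str.strip (String.ofList t))])]
    simp [hstrip]

lemma pvInner (p : String) (out : List String) :
    (PySem.Str.split₀ p).foldl (fun out tok =>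
        if PySem.Str.lower (PySem.Str.strip tok) = "" then out
        else out ++ [PySem.Str.lower (PySem.Str.strip tok)]) out
      = out ++ (PySem.Str.split₀ p).map PySem.Str.lower := by
  have hmem : ∀ t ∈ PySem.Chars.split₀ p.toList,
      t ≠ [] ∧ ∀ c ∈ t, PySem.Chars.isspace c = false := by
    intro t ht
    rw [pvSplit₀_eq_tks] at ht
    exact pvTks_mem p.toList [] t ht (by simp)
  have : PySem.Str.split₀ p = (PySem.Chars.split₀ p.toList).map String.ofList := rfl
  rw [this]
  exact pvInnerAux (PySem.Chars.split₀ p.toList) hmem out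

lemma pvStrSplit₀_strip (p : String) :
    PySem.Str.split₀ (PySem.Str.strip p) = PySem.Str.split₀ p := by
  have h1 : PySem.Str.split₀ (PySem.Str.strip p)
      = (PySem.Chars.split₀ (PySem.Str.strip p).toList).map String.ofList := rfl
  have h2 : PySem.Str.split₀ p = (PySem.Chars.split₀ p.toList).map String.ofList := rfl
  rw [h1, h2, PySem.Str.toList_strip, pvSplit₀_strip]

lemma pvParts (L : List String) :
    (L.filterMap (fun p => if PySem.Str.strip p = "" then none else some (PySem.Str.strip p))).flatMap
        (fun p => (PySem.Str.split₀ p).map PySem.Str.lower)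
      = L.flatMap (fun p => (PySem.Str.split₀ p).map PySem.Str.lower) := by
  induction L with
  | nil => rfl
  | cons p L' ih =>
    by_cases h : PySem.Str.strip p = ""
    · have hnil : PySem.Str.split₀ p = [] := by
        have hc : PySem.Chars.strip p.toList = [] := by
          have := congrArg String.toList h
          simpa [PySem.Str.toList_strip] using this
        have : PySem.Str.split₀ p = (PySem.Chars.split₀ p.toList).map String.ofList := rfl
        rw [this, pvSplit₀_nil_of_strip_nil p.toList hc]
        rfl
      simp [h, List.flatMap_cons, hnil, ih]
    · simp [h, List.flatMap_cons, pvStrSplit₀_strip, ih]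

lemma pvFlat (cs : List Char) :
    (pvSplitComma cs).flatMap (fun q => PySem.Chars.split₀ q)
      = PySem.Chars.split₀ (cs.map pvRep) := by
  obtain ⟨p, ps, hps⟩ : ∃ p ps, pvSplitComma cs = p :: ps := by
    cases hx : pvSplitComma cs with
    | nil => exact absurd hx (pvSplitComma_ne_nil cs)
    | cons a b => exact ⟨a, b, rfl⟩
  have hnc := pvSplitComma_no_comma cs
  rw [pvSplit₀_eq_tks, pvTks_rep cs [] p ps hps, hps]
  have hmap : ∀ q ∈ pvSplitComma cs, (q.map pvRep) = q := fun q hq =>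
    pvMap_rep_eq q (hnc q hq)
  rw [List.flatMap_cons]
  congr 1
  · rw [← pvSplit₀_eq_tks, hmap p (by simp [hps])]
  · exact List.flatMap_congr fun q hq => by
      rw [hmap q (by simp [hps, hq]), ← pvSplit₀_eq_tks,
        ← hmap q (by simp [hps, hq]), pvSplit₀_eq_tks]

-- A's body (after the guards) equals the lowered rep-tokenization of (strip v)
lemma pvMain (s : String) :
    (((PySem.Str.split? s ",").getD []).filterMap
        (fun p => if PySem.Str.strip p = "" then none else some (PySem.Str.strip p))).foldl
      (fun out p => (PySem.Str.split₀ p).foldl (fun out tok =>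
        if PySem.Str.lower (PySem.Str.strip tok) = "" then out
        else out ++ [PySem.Str.lower (PySem.Str.strip tok)]) out) []
    = (pvTks (s.toList.map pvRep) []).map
        (fun t => String.ofList (t.map PySem.Chars.lowerChar)) := by
  have hfun : (fun (out : List String) p => (PySem.Str.split₀ p).foldl (fun out tok =>
        if PySem.Str.lower (PySem.Str.strip tok) = "" then out
        else out ++ [PySem.Str.lower (PySem.Str.strip tok)]) out)
      = (fun out p => out ++ (PySem.Str.split₀ p).map PySem.Str.lower) :=
    funext fun out => funext fun p => pvInner p out
  rw [hfun, PySem.List.foldl_append_eq_flatMap, List.nil_append, pvParts]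
  have hsep : ("," : String).toList = [','] := rfl
  have hL : (PySem.Str.split? s ",").getD []
      = (pvSplitComma s.toList).map String.ofList := by
    simp [PySem.Str.split?, PySem.Chars.split?, hsep, pvSplitOn_comma]
  rw [hL, List.flatMap_map]
  have hlhs : (pvSplitComma s.toList).flatMap
        (fun q => (PySem.Str.split₀ (String.ofList q)).map PySem.Str.lower)
      = (pvSplitComma s.toList).flatMap
        (fun q => (PySem.Chars.split₀ q).map (fun t => String.ofList (PySem.Chars.lower t))) := by
    refine List.flatMap_congr fun q _ => ?_
    rw [pvStrSplit₀_ofList, List.map_map]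
    exact List.map_congr_left fun t _ => pvStrLower_ofList t
  rw [hlhs]
  have hlow : (fun t => String.ofList (PySem.Chars.lower t))
      = (fun t : List Char => String.ofList (t.map PySem.Chars.lowerChar)) := rfl
  rw [hlow, ← pvSplit₀_eq_tks (s.toList.map pvRep), ← pvFlat, List.map_flatMap]

-- B's scanner computes the lowered rep-tokenization, with any running token
lemma pvScanGo (l : List Char) : ∀ (out : List String) (raw : List Char),
    (fun st : List String × List Char =>
        if st.2.isEmpty then st.1 else st.1 ++ [String.ofList st.2.reverse])
      (l.foldl pvStepB (out, raw.map PySem.Chars.lowerChar))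
    = out ++ (pvTks (l.map pvRep) raw).map
        (fun t => String.ofList (t.map PySem.Chars.lowerChar)) := by
  induction l with
  | nil =>
    intro out raw
    simp only [List.foldl_nil, List.map_nil, pvTks_nil]
    by_cases h : raw.isEmpty
    · simp [h]
    · have : (raw.map PySem.Chars.lowerChar).isEmpty = false := by
        simp [List.isEmpty_iff] at h ⊢; exact h
      simp [this, h, List.map_reverse]
  | cons c rest ih =>
    intro out raw
    by_cases hd : c = ',' ∨ PySem.Chars.isspace c = true
    · have hws : PySem.Chars.isspace (pvRep c) = true := by
        rcases hd with h | h
        · subst h; decide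
        · rwa [pvRep_ws c h]
      have hcond : (c = ',' || PySem.Chars.isspace c) = true := by
        rcases hd with h | h <;> simp [h]
      simp only [List.map_cons, pvTks_cons, hws, if_true, List.foldl_cons]
      by_cases hraw : raw.isEmpty
      · have h1 : raw = [] := List.isEmpty_iff.mp hraw
        subst h1
        have hstep : pvStepB (out, ([] : List Char).map PySem.Chars.lowerChar) c = (out, []) := by
          simp [pvStepB, hcond]
        rw [hstep]
        simpa using ih out []
      · have h2 : (raw.map PySem.Chars.lowerChar).isEmpty = false := by
          simp [List.isEmpty_iff] at hraw ⊢; exact hraw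
        have hstep : pvStepB (out, raw.map PySem.Chars.lowerChar) c
            = (out ++ [String.ofList (raw.map PySem.Chars.lowerChar).reverse], []) := by
          simp [pvStepB, hcond, h2]
        rw [hstep]
        have h3 := ih (out ++ [String.ofList (raw.map PySem.Chars.lowerChar).reverse]) []
        simp only [List.map_nil] at h3
        rw [h3]
        simp [hraw, List.map_reverse]
    · have hc : c ≠ ',' := fun h => hd (Or.inl h)
      have hs' : PySem.Chars.isspace c = false := by
        cases h : PySem.Chars.isspace c
        · rfl
        · exact absurd (Or.inr h) hd
      have hrep : pvRep c = c := by simp [pvRep, hc]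
      have hcond : (c = ',' || PySem.Chars.isspace c) = false := by
        simp [hc, hs']
      have hstep : pvStepB (out, raw.map PySem.Chars.lowerChar) c
          = (out, (c :: raw).map PySem.Chars.lowerChar) := by
        simp [pvStepB, hcond]
      simp only [List.map_cons, hrep, pvTks_cons, hs', Bool.false_eq_true, if_false,
        List.foldl_cons, hstep]
      have h4 := ih out (c :: raw)
      simpa using h4

-- ===== VERDICT (by name: the statement is the Claim_ definition above) =====
theorem normalize_triads_spec : Claim_equal_normalize_triads := by
  intro val _
  unfold Spec_normalize_triads
  cases val with
  | none => rfl
  | some v =>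
    have hBv : normalize_triads_alt (some v)
        = (pvTks (v.toList.map pvRep) []).map
            (fun t => String.ofList (t.map PySem.Chars.lowerChar)) := by
      have h := pvScanGo v.toList [] []
      simp only [List.map_nil, List.nil_append] at h
      exact h
    show normalize_triads (some v) = normalize_triads_alt (some v)
    rw [hBv]
    unfold normalize_triads
    by_cases h : PySem.Str.strip v = ""
    · have hws : ∀ c ∈ v.toList, PySem.Chars.isspace c = true := by
        apply pvAllWs_of_strip_nil
        have := congrArg String.toList h
        simpa [PySem.Str.toList_strip] using this
      have hnil : pvTks (v.toList.map pvRep) [] = [] := by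
        rw [pvMap_rep_ws _ hws]; exact pvTks_spaces_nil _ hws
      simp [h, hnil]
    · simp only [if_neg h]
      rw [pvMain (PySem.Str.strip v), PySem.Str.toList_strip, pvTksRep_strip]
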